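-- pv_equiv track=rewrite | github.com/konszymanski/leetcode-dataset | obfuscated_solutions/python/2285-maximum-total-importance-of-roads/solution_1_universal_wrap.py | maximumImportance
-- ===== SOURCE A (Python) =====
-- from typing import List
--
-- def maximumImportance(n: int, roads: List[List[int]]) ->int:
--     if True:
--         degree = [0] * n
--     if True:
--         for edge in roads:
--             degree[edge[0]] += 1
--             degree[edge[1]] += 1
--     degree.sort()
--     value = 1
--     total_importance = 0
--     if True:
--         for d in degree:
--             total_importance += value * d
--             value += 1
--     if True:
--         return total_importance
-- ===== SOURCE B (Python) =====
-- from typing import List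
--
-- def maximumImportance(n: int, roads: List[List[int]]) -> int:
--     degree = [0] * n
--     for road in roads:
--         degree[road[0]] += 1
--         degree[road[1]] += 1
--     freq = {}
--     mx = 0
--     for d in degree:
--         freq[d] = freq.get(d, 0) + 1
--         if d > mx:
--             mx = d
--     total = 0
--     value = 1
--     for d in range(mx + 1):
--         for _ in range(freq.get(d, 0)):
--             total += value * d
--             value += 1
--     return total
-- ===== Notes on version B (the rewrite author's own statement) =====
-- stated objective: alternative
-- what changed: B replaces A's comparison sort of the degree list by a counting sort: one pass builds a degree-frequency dict and running maximum, then values are assigned by walking the degree values 0..max in increasing order.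
import Mathlib
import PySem

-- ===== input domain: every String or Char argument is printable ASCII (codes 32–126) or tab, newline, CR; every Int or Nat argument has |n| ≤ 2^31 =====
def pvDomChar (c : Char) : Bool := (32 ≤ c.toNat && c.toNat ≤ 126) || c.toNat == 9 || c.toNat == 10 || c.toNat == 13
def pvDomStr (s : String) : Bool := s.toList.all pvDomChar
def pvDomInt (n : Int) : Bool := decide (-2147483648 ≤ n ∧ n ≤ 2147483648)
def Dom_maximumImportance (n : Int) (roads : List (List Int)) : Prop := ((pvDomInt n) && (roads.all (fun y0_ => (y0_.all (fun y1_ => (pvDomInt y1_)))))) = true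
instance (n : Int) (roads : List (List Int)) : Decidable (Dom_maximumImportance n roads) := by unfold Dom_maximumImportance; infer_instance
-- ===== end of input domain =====

-- B replaces A's comparison sort of the degree list by a counting pass (a frequency
-- dict plus a walk of the degree values 0..max in increasing order); same return value.

-- ===== PORT A =====
-- shared by both ports: the degree-building loop, which is literally identical in A and B
def pvBuildDegree (n : Int) (roads : List (List Int)) : List Int :=
  roads.foldl (fun deg edge =>
    let i := PySem.List.pyGetD edge 0 0
    let deg1 := PySem.List.pySetD deg i (PySem.List.pyGetD deg i 0 + 1)
    let j := PySem.List.pyGetD edge 1 0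
    PySem.List.pySetD deg1 j (PySem.List.pyGetD deg1 j 0 + 1))
    (PySem.List.pyRepeat [0] n)

-- `degree.sort()` ported as core's stable ascending merge sort (exact: Python's list.sort
-- is a stable ascending sort); the prelude's PySem.List.sorted computes the same list but
-- cannot be evaluated on the long degree lists n admits (proved equal to it below).
def pvSortAsc (L : List Int) : List Int :=
  L.mergeSort (fun a b => a ≤ b)

def maximumImportance (n : Int) (roads : List (List Int)) : Int :=
  let degree := pvBuildDegree n roads
  let degree := pvSortAsc degree
  (degree.foldl (fun (tv : Int × Int) d => (tv.1 + tv.2 * d, tv.2 + 1)) (0, 1)).1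

-- ===== PORT B =====
def maximumImportance_alt (n : Int) (roads : List (List Int)) : Int :=
  let degree := pvBuildDegree n roads
  let fm := degree.foldl (fun (p : PySem.Dict Int Int × Int) d =>
      (p.1.insert d (p.1.getD d 0 + 1), if p.2 < d then d else p.2))
    (PySem.Dict.empty, 0)
  ((PySem.List.pyRange 0 (fm.2 + 1) 1).foldl (fun (tv : Int × Int) d =>
      (PySem.List.pyRange 0 (fm.1.getD d 0) 1).foldl
        (fun (tv : Int × Int) _ => (tv.1 + tv.2 * d, tv.2 + 1)) tv) (0, 1)).1

-- ===== PRECONDITION & SPEC =====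
-- Pre_ excludes exactly the inputs on which A raises an IndexError: an edge with
-- fewer than two entries, or an edge endpoint outside Python's (negative-wrapping)
-- index range of the length-max(n,0) degree list.
def Pre_maximumImportance (n : Int) (roads : List (List Int)) : Prop :=
  ∀ edge ∈ roads, 2 ≤ edge.length ∧
    PySem.Raise.InRange n.toNat (PySem.List.pyGetD edge 0 0) ∧
    PySem.Raise.InRange n.toNat (PySem.List.pyGetD edge 1 0)
instance (n : Int) (roads : List (List Int)) : Decidable (Pre_maximumImportance n roads) := by unfold Pre_maximumImportance; infer_instance

def pvWitness_maximumImportance : Int × List (List Int) := (5, [[0, 1], [1, 2], [2, 3], [0, 2], [1, 3], [2, 4]])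

def Spec_maximumImportance (n : Int) (roads : List (List Int)) (out : Int) : Prop := out = maximumImportance_alt n roads
instance (n : Int) (roads : List (List Int)) (out : Int) : Decidable (Spec_maximumImportance n roads out) := by unfold Spec_maximumImportance; infer_instance

-- ===== CLAIM (what is proved, stated in full; the proofs are below) =====
def Claim_equal_maximumImportance : Prop := ∀ (n : Int) (roads : List (List Int)), Dom_maximumImportance n roads → Pre_maximumImportance n roads → Spec_maximumImportance n roads (maximumImportance n roads)

-- ===== LEMMAS AND PROOFS =====

-- the counting-sorted rearrangement of L (all of whose members lie in [0, mx])
def pvCanon (L : List Int) (mx : Int) : List Int :=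
  (PySem.List.pyRange 0 (mx + 1) 1).flatMap (fun d => List.replicate (L.count d) d)

theorem pv_flat_pairwise (ds : List Int) (c : Int → Nat) (h : ds.Pairwise (· < ·)) :
    (ds.flatMap (fun d => List.replicate (c d) d)).Pairwise (· ≤ ·) := by
  induction ds with
  | nil => simp
  | cons a t ih =>
    rw [List.flatMap_cons, List.pairwise_append]
    rw [List.pairwise_cons] at h
    obtain ⟨ha, ht⟩ := h
    refine ⟨List.pairwise_replicate.mpr (Or.inr le_rfl), ih ht, ?_⟩
    intro x hx y hy
    rw [List.mem_replicate] at hx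
    simp only [List.mem_flatMap, List.mem_replicate] at hy
    obtain ⟨d, hd, hy2⟩ := hy
    rw [hx.2, hy2.2]
    exact (ha d hd).le

theorem pv_canon_pairwise (L : List Int) (mx : Int) :
    (pvCanon L mx).Pairwise (· ≤ ·) :=
  pv_flat_pairwise _ _ (PySem.List.pairwise_lt_pyRange_one 0 (mx + 1))

theorem pv_count_flat (ds : List Int) (L : List Int) (v : Int) (hnd : ds.Nodup) :
    (ds.flatMap (fun d => List.replicate (L.count d) d)).count v
      = if v ∈ ds then L.count v else 0 := by
  induction ds with
  | nil => simp
  | cons a t ih =>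
    rw [List.nodup_cons] at hnd
    obtain ⟨hna, hnt⟩ := hnd
    rw [List.flatMap_cons, List.count_append, ih hnt]
    by_cases hv : v = a
    · subst hv
      rw [List.count_replicate]
      simp only [beq_self_eq_true, if_true, List.mem_cons, true_or]
      rw [if_neg hna]
      omega
    · simp [List.count_replicate, Ne.symm hv, List.mem_cons, hv]

theorem pv_canon_perm {L : List Int} {mx : Int}
    (h : ∀ x ∈ L, 0 ≤ x ∧ x ≤ mx) : (pvCanon L mx).Perm L := by
  rw [List.perm_iff_count]
  intro v
  unfold pvCanon
  rw [pv_count_flat _ _ _ (PySem.List.nodup_pyRange_one 0 (mx + 1))]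
  by_cases hv : v ∈ PySem.List.pyRange 0 (mx + 1) 1
  · simp [hv]
  · rw [if_neg hv, Eq.comm, List.count_eq_zero]
    intro hvL
    exact hv (PySem.List.mem_pyRange_one.mpr ⟨(h v hvL).1, by have := (h v hvL).2; omega⟩)

theorem pv_foldl_const {α σ : Type} (l : List α) (g : σ → σ) (s : σ) :
    l.foldl (fun tv _ => g tv) s = g^[l.length] s := by
  induction l generalizing s with
  | nil => rfl
  | cons a t ih => simp [List.foldl_cons, ih, Function.iterate_succ_apply]

theorem pv_foldl_replicate {σ : Type} (c : Nat) (d : Int) (g : Int → σ → σ) (s : σ) :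
    (List.replicate c d).foldl (fun tv x => g x tv) s = (g d)^[c] s := by
  induction c generalizing s with
  | zero => rfl
  | succ k ih => simp [List.replicate_succ, ih, Function.iterate_succ_apply]

theorem pv_mem_pySetD {α : Type} {xs : List α} {i : Int} {v x : α}
    (h : x ∈ PySem.List.pySetD xs i v) : x ∈ xs ∨ x = v := by
  unfold PySem.List.pySetD PySem.List.pySet? at h
  cases hk : PySem.List.pyIdx? xs.length i with
  | none => rw [hk] at h; simpa using Or.inl h
  | some k =>
    rw [hk] at h
    simp only [Option.map_some, Option.getD_some] at h
    exact List.mem_or_eq_of_mem_set h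

theorem pv_pyGetD_nonneg {xs : List Int} (i : Int)
    (h : ∀ x ∈ xs, 0 ≤ x) : 0 ≤ PySem.List.pyGetD xs i 0 := by
  unfold PySem.List.pyGetD
  cases hg : PySem.List.pyGet? xs i with
  | none => simp
  | some y => simpa using h y (PySem.List.mem_of_pyGet?_eq_some xs hg)

theorem pv_buildDegree_nonneg (n : Int) (roads : List (List Int)) :
    ∀ x ∈ pvBuildDegree n roads, 0 ≤ x := by
  unfold pvBuildDegree
  have main : ∀ (rs : List (List Int)) (deg : List Int), (∀ x ∈ deg, 0 ≤ x) →
      ∀ x ∈ rs.foldl (fun deg edge =>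
        let i := PySem.List.pyGetD edge 0 0
        let deg1 := PySem.List.pySetD deg i (PySem.List.pyGetD deg i 0 + 1)
        let j := PySem.List.pyGetD edge 1 0
        PySem.List.pySetD deg1 j (PySem.List.pyGetD deg1 j 0 + 1)) deg, 0 ≤ x := by
    intro rs
    induction rs with
    | nil => intro deg h; simpa using h
    | cons r t ih =>
      intro deg h
      rw [List.foldl_cons]
      apply ih
      intro x hx
      have h1 : ∀ y ∈ PySem.List.pySetD deg (PySem.List.pyGetD r 0 0)
          (PySem.List.pyGetD deg (PySem.List.pyGetD r 0 0) 0 + 1), 0 ≤ y := by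
        intro y hy
        rcases pv_mem_pySetD hy with hm | rfl
        · exact h y hm
        · have := pv_pyGetD_nonneg (PySem.List.pyGetD r 0 0) h; omega
      rcases pv_mem_pySetD hx with hm | rfl
      · exact h1 x hm
      · have := pv_pyGetD_nonneg (PySem.List.pyGetD r 1 0) h1; omega
  intro x hx
  refine main roads _ ?_ x hx
  intro y hy
  rw [PySem.List.pyRepeat_singleton, List.mem_replicate] at hy
  omega

theorem pv_sortAsc_eq_sorted (L : List Int) :
    pvSortAsc L = PySem.List.sorted L (fun x => x) := by
  refine (PySem.List.sorted_id_eq_of_perm_of_pairwise L (pvSortAsc L)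
    (List.mergeSort_perm L _) ?_).symm
  have h := List.pairwise_mergeSort (le := fun a b : Int => decide (a ≤ b))
    (by intro a b c hab hbc; simp only [decide_eq_true_eq] at *; omega)
    (by intro a b; simp only [Bool.or_eq_true, decide_eq_true_eq]; omega) L
  exact h.imp (by intro a b hab; simpa using hab)

-- ===== VERDICT (by name: the statement is the Claim_ definition above) =====
theorem maximumImportance_spec : Claim_equal_maximumImportance := by
  intro n roads _ _
  unfold Spec_maximumImportance maximumImportance maximumImportance_alt
  simp only []
  rw [PySem.List.foldl_prod_mk (fun (dd : PySem.Dict Int Int) d => dd.insert d (dd.getD d 0 + 1))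
    (fun (m : Int) d => if m < d then d else m)]
  have hfun : (fun (m : Int) (d : Int) => if m < d then d else m) = fun m d => max m d := by
    funext m d
    by_cases h : m < d
    · rw [if_pos h, max_eq_right h.le]
    · rw [if_neg h, max_eq_left (not_lt.mp h)]
  rw [hfun]
  rw [pv_sortAsc_eq_sorted]
  generalize hLd : pvBuildDegree n roads = L
  have hnn : ∀ x ∈ L, 0 ≤ x := hLd ▸ pv_buildDegree_nonneg n roads
  have hmx := PySem.List.le_foldl_max L 0
  have hsorted : (PySem.List.sorted L fun x => x) = pvCanon L (L.foldl max 0) :=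
    PySem.List.sorted_id_eq_of_perm_of_pairwise _ _
      (pv_canon_perm (fun x hx => ⟨hnn x hx, hmx.2 x hx⟩)) (pv_canon_pairwise L _)
  rw [hsorted]
  unfold pvCanon
  rw [List.foldl_flatMap]
  dsimp only
  refine congrArg Prod.fst ?_
  apply congrFun
  apply congrArg (fun F => List.foldl F ((0 : Int), (1 : Int)))
  funext tv d
  rw [pv_foldl_replicate (L.count d) d (fun x tv => (tv.1 + tv.2 * x, tv.2 + 1)) tv]
  rw [PySem.Dict.getD_foldl_insert_add_one,
    show (PySem.Dict.empty : PySem.Dict Int Int).getD d 0 = 0 from rfl, zero_add,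
    pv_foldl_const (PySem.List.pyRange 0 ((List.count d L : Nat) : Int))
      (fun tv => (tv.1 + tv.2 * d, tv.2 + 1)) tv,
    PySem.List.length_pyRange_one]
  norm_num
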